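-- pv_equiv track=rewrite | github.com/xxrenzhe/huoziwriter | apps/worker-py/queue_runtime.py | extract_prompt_line
-- ===== SOURCE A (Python) =====
-- def extract_prompt_line(user_prompt: str, prefix: str) -> str:
--     lines = user_prompt.splitlines()
--     for index, line in enumerate(lines):
--         if not line.startswith(prefix):
--             continue
--         inline_value = line[len(prefix) :].strip()
--         if inline_value:
--             return inline_value
--         for follow_line in lines[index + 1 :]:
--             normalized = follow_line.strip()
--             if normalized:
--                 return normalized
--     return ""
-- ===== SOURCE B (Python) =====
-- def extract_prompt_line(user_prompt: str, prefix: str) -> str: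
--     # Single flat pass with a state flag instead of a nested inner loop.
--     found_empty_prefix = False
--     for line in user_prompt.splitlines():
--         if found_empty_prefix:
--             normalized = line.strip()
--             if normalized:
--                 return normalized
--         elif line.startswith(prefix):
--             inline_value = line[len(prefix):].strip()
--             if inline_value:
--                 return inline_value
--             found_empty_prefix = True
--     return ""
-- ===== Notes on version B (the rewrite author's own statement) =====
-- stated objective: simpler
-- what changed: Replaces the nested loop (for each prefixed line, rescan the remaining lines) by one flat single pass with a boolean state flag that switches from 'looking for the prefix' to 'looking for the next non-empty line'.
import Mathlib
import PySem

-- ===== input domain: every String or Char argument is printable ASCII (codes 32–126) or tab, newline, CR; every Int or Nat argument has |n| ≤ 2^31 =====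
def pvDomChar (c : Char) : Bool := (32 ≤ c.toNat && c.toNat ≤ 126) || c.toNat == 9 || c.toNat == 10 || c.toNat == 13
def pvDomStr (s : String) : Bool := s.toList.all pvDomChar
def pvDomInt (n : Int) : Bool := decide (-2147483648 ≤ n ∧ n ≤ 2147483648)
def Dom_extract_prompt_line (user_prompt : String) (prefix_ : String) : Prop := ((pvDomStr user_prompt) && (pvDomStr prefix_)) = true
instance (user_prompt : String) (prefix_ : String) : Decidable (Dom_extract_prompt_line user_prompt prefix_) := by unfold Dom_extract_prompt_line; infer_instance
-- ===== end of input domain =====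

-- B replaces A's nested rescan of the remaining lines by one flat pass with a boolean state flag (simpler, same result).

-- ===== PORT A =====
-- inner loop: 'for follow_line in lines[index + 1:]: …' (returns the first non-empty stripped line, none if exhausted)
def pvInnerA : List String → Option String
  | [] => none
  | follow_line :: rest =>
    let normalized := PySem.Str.strip follow_line
    if normalized ≠ "" then some normalized else pvInnerA rest

-- outer loop over 'enumerate(lines)'; 'lines[index + 1:]' is exactly the remaining list 'rest'
def pvOuterA (prefix_ : String) : List String → String
  | [] => ""
  | line :: rest =>
    if ¬ PySem.Str.startswith line prefix_ then pvOuterA prefix_ rest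
    else
      let inline_value := PySem.Str.strip (PySem.Str.slice line (some (PySem.Str.len prefix_)) none)
      if inline_value ≠ "" then inline_value
      else
        match pvInnerA rest with
        | some normalized => normalized
        | none => pvOuterA prefix_ rest

def extract_prompt_line (user_prompt : String) (prefix_ : String) : String :=
  pvOuterA prefix_ (PySem.Str.splitlines user_prompt)

-- ===== PORT B =====
-- one flat pass; the Bool is Source B's 'found_empty_prefix' state flag
def pvScanB (prefix_ : String) (found_empty_prefix : Bool) : List String → String
  | [] => ""
  | line :: rest =>
    if found_empty_prefix then
      let normalized := PySem.Str.strip line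
      if normalized ≠ "" then normalized else pvScanB prefix_ true rest
    else if PySem.Str.startswith line prefix_ then
      let inline_value := PySem.Str.strip (PySem.Str.slice line (some (PySem.Str.len prefix_)) none)
      if inline_value ≠ "" then inline_value else pvScanB prefix_ true rest
    else pvScanB prefix_ false rest

def extract_prompt_line_alt (user_prompt : String) (prefix_ : String) : String :=
  pvScanB prefix_ false (PySem.Str.splitlines user_prompt)

-- ===== PRECONDITION & SPEC =====
def Spec_extract_prompt_line (user_prompt : String) (prefix_ : String) (out : String) : Prop := out = extract_prompt_line_alt user_prompt prefix_
instance (user_prompt : String) (prefix_ : String) (out : String) : Decidable (Spec_extract_prompt_line user_prompt prefix_ out) := by unfold Spec_extract_prompt_line; infer_instance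

-- ===== CLAIM (what is proved, stated in full; the proofs are below) =====
def Claim_equal_extract_prompt_line : Prop := ∀ (user_prompt : String) (prefix_ : String), Dom_extract_prompt_line user_prompt prefix_ → Spec_extract_prompt_line user_prompt prefix_ (extract_prompt_line user_prompt prefix_)

-- ===== LEMMAS AND PROOFS =====

-- strip s = "" exactly when every character of s is whitespace
theorem pv_strip_eq_empty_iff (s : String) :
    PySem.Str.strip s = "" ↔ ∀ c ∈ s.toList, PySem.Chars.isspace c = true := by
  unfold PySem.Str.strip
  constructor
  · intro h c hc
    have h' : PySem.Chars.strip s.toList = [] := by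
      have := congrArg String.toList h
      simpa using this
    unfold PySem.Chars.strip PySem.Chars.rstrip PySem.Chars.lstrip at h'
    rcases List.eq_nil_or_concat (List.dropWhile PySem.Chars.isspace s.toList) with hn | ⟨l', a, ha⟩
    · have := (List.dropWhile_eq_nil_iff).mp hn
      exact this c hc
    · exfalso
      have : (List.dropWhile PySem.Chars.isspace
          (List.dropWhile PySem.Chars.isspace s.toList).reverse).reverse = [] := h'
      have h2 : List.dropWhile PySem.Chars.isspace
          (List.dropWhile PySem.Chars.isspace s.toList).reverse = [] := by
        simpa using congrArg List.reverse this
      have h3 := (List.dropWhile_eq_nil_iff).mp h2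
      -- first element of dropWhile's result is not whitespace, contradiction
      rcases hx : List.dropWhile PySem.Chars.isspace s.toList with _ | ⟨b, bs⟩
      · simp [hx] at ha
      · have hb : PySem.Chars.isspace b = false := by
          have := List.head?_dropWhile_not (p := PySem.Chars.isspace) (l := s.toList)
          simp [hx] at this
          simpa using this
        have : PySem.Chars.isspace b = true := by
          apply h3
          simp [hx]
        simp [hb] at this
  · intro h
    have h1 : List.dropWhile PySem.Chars.isspace s.toList = [] :=
      List.dropWhile_eq_nil_iff.mpr h
    unfold PySem.Chars.strip PySem.Chars.rstrip PySem.Chars.lstrip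
    simp [h1]

-- the stripped tail of an all-whitespace line is empty
theorem pv_strip_slice_empty (line : String) (k : Int)
    (h : PySem.Str.strip line = "") :
    PySem.Str.strip (PySem.Str.slice line (some k) none) = "" := by
  rw [pv_strip_eq_empty_iff] at h ⊢
  intro c hc
  apply h
  unfold PySem.Str.slice at hc
  simp only [String.toList_ofList] at hc
  have hc' : c ∈ PySem.List.slice line.toList (some k) none := by
    simpa [PySem.Chars.slice_eq_listSlice] using hc
  exact PySem.List.mem_of_mem_slice _ _ _ hc'

-- A's inner scan finds nothing exactly when every remaining line strips to ""
theorem pv_innerA_eq_none (ls : List String) :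
    pvInnerA ls = none ↔ ∀ l ∈ ls, PySem.Str.strip l = "" := by
  induction ls with
  | nil => simp [pvInnerA]
  | cons l rest ih =>
    by_cases h : PySem.Str.strip l = ""
    · simp [pvInnerA, h, ih]
    · simp [pvInnerA, h]

-- if every line strips to "", A's outer loop returns ""
theorem pv_outerA_all_empty (prefix_ : String) (ls : List String)
    (h : ∀ l ∈ ls, PySem.Str.strip l = "") : pvOuterA prefix_ ls = "" := by
  induction ls with
  | nil => rfl
  | cons line rest ih =>
    have hl : PySem.Str.strip line = "" := h line (List.mem_cons_self ..)
    have hr : ∀ l ∈ rest, PySem.Str.strip l = "" := fun l hm => h l (List.mem_cons_of_mem _ hm)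
    have hinl : PySem.Str.strip (PySem.Str.slice line (some ((prefix_.length : Int))) none) = "" :=
      pv_strip_slice_empty line _ hl
    have hinner : pvInnerA rest = none := (pv_innerA_eq_none rest).mpr hr
    by_cases hs : PySem.Chars.startswith line.toList prefix_.toList = true
    · simp [pvOuterA, hs, hinl, hinner, ih hr]
    · simp [pvOuterA, hs, ih hr]

-- in the 'found' state, B returns A's inner-scan result (or "" if it finds nothing)
theorem pv_scanB_true (prefix_ : String) (ls : List String) :
    pvScanB prefix_ true ls = ((pvInnerA ls).getD "") := by
  induction ls with
  | nil => rfl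
  | cons l rest ih =>
    by_cases h : PySem.Str.strip l = ""
    · simp [pvScanB, pvInnerA, h, ih]
    · simp [pvScanB, pvInnerA, h]

-- the two loops agree from the initial state
theorem pv_outerA_eq_scanB (prefix_ : String) (ls : List String) :
    pvOuterA prefix_ ls = pvScanB prefix_ false ls := by
  induction ls with
  | nil => rfl
  | cons line rest ih =>
    by_cases hs : PySem.Chars.startswith line.toList prefix_.toList = true
    · by_cases hi : PySem.Str.strip (PySem.Str.slice line (some ((prefix_.length : Int))) none) = ""
      · rcases hinner : pvInnerA rest with _ | v
        · have hr := (pv_innerA_eq_none rest).mp hinner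
          simp [pvOuterA, pvScanB, hs, hi, hinner, pv_scanB_true,
            pv_outerA_all_empty prefix_ rest hr]
        · simp [pvOuterA, pvScanB, hs, hi, hinner, pv_scanB_true]
      · simp [pvOuterA, pvScanB, hs, hi]
    · simp [pvOuterA, pvScanB, hs, ih]

-- ===== VERDICT (by name: the statement is the Claim_ definition above) =====
theorem extract_prompt_line_spec : Claim_equal_extract_prompt_line := by
  intro user_prompt prefix_ _
  unfold Spec_extract_prompt_line extract_prompt_line extract_prompt_line_alt
  exact pv_outerA_eq_scanB _ _
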